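-- pv_equiv track=rewrite | github.com/Aasthaengg/IBMdataset | Python_codes/p02987/s035718669.py | solve
-- ===== SOURCE A (Python) =====
-- def solve(s):
--     # implement process
--     a,b = "",""
--     cnt = 0
--     # process
--     for c in s:
--         if a == "":
--             a = c
--             cnt += 1
--         elif a == c:
--             cnt += 1
--         elif b == "":
--             b = c
--         elif b != c:
--             return False
--     return cnt == 2
-- ===== SOURCE B (Python) =====
-- def solve(s):
--     if len(set(s)) > 2:
--         return False
--     return bool(s) and s.count(s[0]) == 2
-- ===== Notes on version B (the rewrite author's own statement) =====
-- stated objective: simpler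
-- what changed: Replaces A's single stateful scan (tracking the first char, its running count, and a second char with an early return) by two stateless whole-string library passes: a distinct-character set plus a count of the first character, with bool(s) guarding the empty string.
import Mathlib
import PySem

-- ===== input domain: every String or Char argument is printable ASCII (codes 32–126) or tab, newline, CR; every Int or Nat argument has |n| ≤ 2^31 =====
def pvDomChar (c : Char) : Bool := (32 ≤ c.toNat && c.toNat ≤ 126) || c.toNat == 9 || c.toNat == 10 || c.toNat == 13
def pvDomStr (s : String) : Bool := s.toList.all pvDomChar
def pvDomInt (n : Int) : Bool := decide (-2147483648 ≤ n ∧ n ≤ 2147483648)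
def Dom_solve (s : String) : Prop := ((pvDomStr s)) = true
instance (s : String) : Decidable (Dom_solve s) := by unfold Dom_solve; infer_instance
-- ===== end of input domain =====

-- B replaces A's single stateful scan (first char, its count, a second char, early return)
-- by two stateless whole-string passes: a distinct-character set plus a count of the first
-- character; objective: simpler.


-- ===== PORT A =====
-- Python's empty-string sentinels a = "" / b = "" are modelled by Option Char (none = "").
def solveLoop : List Char → Option Char → Option Char → Int → Bool
  | [], _, _, cnt => cnt == 2
  | c :: rest, a, b, cnt =>
    match a with
    | none => solveLoop rest (some c) b (cnt + 1)
    | some a0 =>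
      if a0 = c then solveLoop rest (some a0) b (cnt + 1)
      else
        match b with
        | none => solveLoop rest (some a0) (some c) cnt
        | some b0 => if b0 ≠ c then false else solveLoop rest (some a0) (some b0) cnt

def solve (s : String) : Bool := solveLoop s.toList none none 0

-- ===== PORT B =====
-- Source B: if len(set(s)) > 2: return False
--       return bool(s) and s.count(s[0]) == 2
-- (s[0] is only evaluated when s is nonempty, guarded by bool(s); head! mirrors that guard)
def solve_alt (s : String) : Bool :=
  if 2 < (PySem.Set.ofList s.toList).length then false
  else !s.toList.isEmpty && (PySem.Str.count s (String.ofList [s.toList.head!]) == 2)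

-- ===== PRECONDITION & SPEC =====
def Spec_solve (s : String) (out : Bool) : Prop := out = solve_alt s
instance (s : String) (out : Bool) : Decidable (Spec_solve s out) := by unfold Spec_solve; infer_instance

-- ===== CLAIM (what is proved, stated in full; the proofs are below) =====
def Claim_equal_solve : Prop := ∀ (s : String), Dom_solve s → Spec_solve s (solve s)

-- ===== LEMMAS AND PROOFS =====

theorem beq_congr_two (a b : Int) (h : a = b) : (a == 2) = (b == 2) := by rw [h]

-- str.count with a single-character needle is the character count
theorem chars_count_go_single (c : Char) : ∀ (l : List Char) (acc : Nat),
    PySem.Chars.count.go [c] l.length l acc = acc + l.count c := by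
  intro l
  induction l with
  | nil => intro acc; simp [PySem.Chars.count.go]
  | cons h t ih =>
    intro acc
    by_cases hc : c = h
    · subst hc
      simp [PySem.Chars.count.go, List.isPrefixOf, ih, List.count_cons]
      omega
    · simp [PySem.Chars.count.go, List.isPrefixOf, hc, ih, List.count_cons, Ne.symm hc]

theorem str_count_single (s : String) (c : Char) :
    PySem.Str.count s (String.ofList [c]) = s.toList.count c := by
  rw [PySem.Str.count_eq]
  have h := chars_count_go_single c s.toList 0
  simpa [PySem.Chars.count] using h

theorem ofList_length_eq_card (l : List Char) :
    (PySem.Set.ofList l).length = l.toFinset.card := by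
  have h1 : (PySem.Set.ofList l).Nodup := PySem.Set.nodup_ofList l
  have h2 : (PySem.Set.ofList l).toFinset = l.toFinset := by
    apply Finset.ext; intro x
    simp [List.mem_toFinset, PySem.Set.mem_ofList]
  rw [← List.toFinset_card_of_nodup h1, h2]

-- characterization of the loop once both a and b are fixed
theorem solveLoop_some_some (a0 b0 : Char) : ∀ (l : List Char) (cnt : Int),
    solveLoop l (some a0) (some b0) cnt =
      if l.all (fun c => c == a0 || c == b0) then (cnt + (l.count a0 : Int)) == 2 else false := by
  intro l
  induction l with
  | nil => intro cnt; simp [solveLoop]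
  | cons c rest ih =>
    intro cnt
    by_cases h1 : a0 = c
    · subst h1
      rw [solveLoop, if_pos rfl, ih]
      simp only [List.all_cons, beq_self_eq_true, Bool.true_or, Bool.true_and,
        List.count_cons_self]
      split_ifs
      · exact beq_congr_two _ _ (by push_cast; ring)
      · rfl
    · by_cases h2 : b0 = c
      · subst h2
        simp only [solveLoop, if_neg h1, ne_eq, not_true_eq_false, if_neg, ih,
          List.all_cons, List.count_cons]
        simp [Ne.symm h1]
      · simp only [solveLoop, if_neg h1]
        simp [h2, List.all_cons, Ne.symm h1, Ne.symm h2]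

-- characterization of the loop once a is fixed and b is still empty
theorem solveLoop_some_none (a0 : Char) : ∀ (l : List Char) (cnt : Int),
    solveLoop l (some a0) none cnt =
      match l.find? (fun c => c != a0) with
      | none => (cnt + (l.count a0 : Int)) == 2
      | some b0 =>
          if l.all (fun c => c == a0 || c == b0) then (cnt + (l.count a0 : Int)) == 2 else false := by
  intro l
  induction l with
  | nil => intro cnt; simp [solveLoop]
  | cons c rest ih =>
    intro cnt
    by_cases h1 : a0 = c
    · subst h1
      rw [solveLoop, if_pos rfl, ih]
      simp only [List.find?_cons, bne_self_eq_false, List.count_cons_self]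
      cases hf : rest.find? (fun c => c != a0) with
      | none =>
        exact beq_congr_two _ _ (by push_cast; ring)
      | some b0 =>
        simp only [List.all_cons, beq_self_eq_true, Bool.true_or, Bool.true_and]
        split_ifs
        · exact beq_congr_two _ _ (by push_cast; ring)
        · rfl
    · rw [solveLoop, if_neg h1, solveLoop_some_some]
      have hb : ((c != a0) = true) := by simp [Ne.symm h1]
      simp only [List.find?_cons, hb, List.all_cons, List.count_cons]
      simp [Ne.symm h1]

theorem card_le_two_of_all (c b0 : Char) (rest : List Char)
    (h : ∀ x ∈ rest, x = c ∨ x = b0) :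
    (c :: rest).toFinset.card ≤ 2 := by
  have hsub : (c :: rest).toFinset ⊆ ({c, b0} : Finset Char) := by
    intro x hx
    simp only [List.toFinset_cons, Finset.mem_insert, List.mem_toFinset] at hx
    rcases hx with h' | h'
    · simp [h']
    · rcases h x h' with h'' | h'' <;> simp [h'']
  calc (c :: rest).toFinset.card ≤ ({c, b0} : Finset Char).card := Finset.card_le_card hsub
    _ ≤ 2 := le_trans (Finset.card_insert_le _ _) (by simp)

theorem two_lt_card_of_three (c b0 x : Char) (rest : List Char)
    (hb : b0 ∈ rest) (hx : x ∈ rest) (hbc : b0 ≠ c) (hxc : x ≠ c) (hxb : x ≠ b0) :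
    2 < (c :: rest).toFinset.card := by
  rw [Finset.two_lt_card_iff]
  exact ⟨c, b0, x, by simp, by simp [hb], by simp [hx], Ne.symm hbc, Ne.symm hxc, Ne.symm hxb⟩

theorem beq_int_nat (cnt : Nat) : ((1 + (cnt : Int)) == 2) = ((cnt + 1) == 2) := by
  by_cases h : cnt = 1 <;> simp [h] <;> omega

theorem solve_eq_alt (s : String) : solve s = solve_alt s := by
  unfold solve solve_alt
  cases hl : s.toList with
  | nil => simp [hl, solveLoop, ofList_length_eq_card]
  | cons c rest =>
    rw [solveLoop, solveLoop_some_none, str_count_single, hl]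
    simp only [List.isEmpty_cons, List.head!_cons, ofList_length_eq_card, hl,
      List.count_cons_self, Bool.not_false, Bool.true_and]
    cases hf : rest.find? (fun x => x != c) with
    | none =>
      dsimp only
      have hall : ∀ x ∈ rest, x = c := by
        intro x hx
        have := List.find?_eq_none.mp hf x hx
        simpa using this
      have hcard : (c :: rest).toFinset.card ≤ 2 :=
        card_le_two_of_all c c rest (fun x hx => Or.inl (hall x hx))
      rw [if_neg (by omega)]
      exact beq_int_nat (rest.count c)
    | some b0 =>
      dsimp only
      have hb0 : b0 ∈ rest ∧ b0 ≠ c := by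
        have h1 := List.find?_some hf
        have h2 := List.mem_of_find?_eq_some hf
        exact ⟨h2, by simpa using h1⟩
      by_cases hall : rest.all (fun x => x == c || x == b0)
      · have hcard : (c :: rest).toFinset.card ≤ 2 := by
          apply card_le_two_of_all c b0 rest
          intro x hx
          have := List.all_eq_true.mp hall x hx
          simpa using this
        rw [if_pos hall, if_neg (by omega)]
        exact beq_int_nat (rest.count c)
      · obtain ⟨x, hx, hxp⟩ : ∃ x ∈ rest, ¬(x = c ∨ x = b0) := by
          have h := List.all_eq_true.not.mp hall
          push_neg at h
          obtain ⟨x, hx, hxp⟩ := h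
          exact ⟨x, hx, by simpa using hxp⟩
        have hcard : 2 < (c :: rest).toFinset.card :=
          two_lt_card_of_three c b0 x rest hb0.1 hx hb0.2
            (fun h => hxp (Or.inl h)) (fun h => hxp (Or.inr h))
        rw [if_neg (by simpa using hall), if_pos hcard]

-- ===== VERDICT (by name: the statement is the Claim_ definition above) =====
theorem solve_spec : Claim_equal_solve := by
  intro s _
  unfold Spec_solve
  exact solve_eq_alt s
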